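-- pv_equiv track=rewrite | github.com/LogithaAK/IS | app.py | row_transposition_encrypt
-- ===== SOURCE A (Python) =====
-- def row_transposition_encrypt(message, key_input):
--     message = message.replace(" ", "")
--     key = [int(k) for k in key_input]
--     rows = len(key)
--     cols = (len(message) + rows - 1) // rows
--     grid = [['' for _ in range(cols)] for _ in range(rows)]
--     i = 0
--     for r in range(rows):
--         for c in range(cols):
--             if i < len(message):
--                 grid[r][c] = message[i]
--                 i += 1
--     key_order = sorted(list(enumerate(key)), key=lambda x: x[1])
--     encrypted = ''
--     for idx, _ in key_order:
--         for ch in grid[idx]: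
--             if ch:
--                 encrypted += ch
--     return encrypted
-- ===== SOURCE B (Python) =====
-- def row_transposition_encrypt(message, key_input):
--     message = message.replace(" ", "")
--     key = [int(k) for k in key_input]
--     rows = len(key)
--     cols = (len(message) + rows - 1) // rows
--     rows_list = [message[r * cols:(r + 1) * cols] for r in range(rows)]
--     order = sorted(range(rows), key=lambda r: key[r])
--     return ''.join(rows_list[r] for r in order)
-- ===== Notes on version B (the rewrite author's own statement) =====
-- stated objective: simpler
-- what changed: Replaces the mutable 2D character grid (nested fill loops plus cell-by-cell read with emptiness tests) by direct string slicing into row strings and a stable sort of the row indices by their key digit, joining the rows in that order.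
import Mathlib
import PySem

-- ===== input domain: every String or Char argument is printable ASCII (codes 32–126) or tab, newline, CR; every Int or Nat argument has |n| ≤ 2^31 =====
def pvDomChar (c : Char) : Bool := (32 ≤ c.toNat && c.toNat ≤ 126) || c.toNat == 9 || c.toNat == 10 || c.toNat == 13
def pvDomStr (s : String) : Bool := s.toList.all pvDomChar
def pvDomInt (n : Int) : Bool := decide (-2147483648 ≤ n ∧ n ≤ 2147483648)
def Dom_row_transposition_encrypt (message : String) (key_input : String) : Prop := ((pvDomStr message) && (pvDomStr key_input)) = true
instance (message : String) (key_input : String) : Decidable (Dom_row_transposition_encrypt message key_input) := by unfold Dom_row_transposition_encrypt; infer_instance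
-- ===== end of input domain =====

-- B replaces A's mutable 2D grid fill/read with direct slicing and a stable index sort (objective: simpler).


-- int(k) for a one-character string k; none exactly where Python raises ValueError (excluded by Pre_)
def pvIntChar (c : Char) : Option Int := PySem.Int.ofStr? (String.singleton c)

-- ===== PORT A =====
-- grid[r][c] = v (2-D in-place assignment; r, c are in range wherever A executes it)
def pvSet2 (g : List (List (List Char))) (r c : Int) (v : List Char) : List (List (List Char)) :=
  g.set r.toNat ((g.getD r.toNat []).set c.toNat v)

def row_transposition_encrypt (message : String) (key_input : String) : String :=
  let msg := (PySem.Str.replace message " " "").toList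
  -- Pre_ guarantees every int(k) succeeds; `.getD 0` only fills the Option where Python raises
  let key : List Int := key_input.toList.map (fun k => (pvIntChar k).getD 0)
  let rows : Int := (key.length : Int)
  let cols : Int := PySem.Int.floordiv ((msg.length : Int) + rows - 1) rows
  let grid : List (List (List Char)) :=
    (PySem.List.pyRange 0 rows 1).map (fun _ => (PySem.List.pyRange 0 cols 1).map (fun _ => []))
  let st : List (List (List Char)) × Int :=
    (PySem.List.pyRange 0 rows 1).foldl (fun st r =>
      (PySem.List.pyRange 0 cols 1).foldl (fun st c =>
        if st.2 < (msg.length : Int) then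
          -- message[i]: the guard keeps i in range, so the default is never read
          (pvSet2 st.1 r c [PySem.List.pyGetD msg st.2 ' '], st.2 + 1)
        else st) st) (grid, 0)
  let keyOrder := PySem.List.sorted (PySem.List.enumerate key) (fun x => x.2)
  let encrypted : List Char :=
    keyOrder.foldl (fun acc p =>
      (PySem.List.pyGetD st.1 p.1 []).foldl (fun acc ch =>
        if ch ≠ [] then acc ++ ch else acc) acc) []
  String.ofList encrypted

-- ===== PORT B =====
def row_transposition_encrypt_alt (message : String) (key_input : String) : String :=
  let msg := (PySem.Str.replace message " " "").toList
  let key : List Int := key_input.toList.map (fun k => (pvIntChar k).getD 0)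
  let rows : Int := (key.length : Int)
  let cols : Int := PySem.Int.floordiv ((msg.length : Int) + rows - 1) rows
  let rowsList : List (List Char) :=
    (PySem.List.pyRange 0 rows 1).map (fun r => PySem.List.slice msg (some (r * cols)) (some ((r + 1) * cols)))
  let order := PySem.List.sorted (PySem.List.pyRange 0 rows 1) (fun r => PySem.List.pyGetD key r 0)
  String.ofList ((order.map (fun r => PySem.List.pyGetD rowsList r [])).flatten)

-- ===== PRECONDITION & SPEC =====
-- A raises ValueError on any non-digit key character and ZeroDivisionError on an empty key; excluded here.
def Pre_row_transposition_encrypt (message : String) (key_input : String) : Prop :=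
  key_input.toList ≠ [] ∧ key_input.toList.all (fun c => c.isDigit) = true

instance (message : String) (key_input : String) : Decidable (Pre_row_transposition_encrypt message key_input) := by
  unfold Pre_row_transposition_encrypt; infer_instance

def pvWitness_row_transposition_encrypt : String × String := ("HELLO WORLD", "3124")

def Spec_row_transposition_encrypt (message : String) (key_input : String) (out : String) : Prop := out = row_transposition_encrypt_alt message key_input
instance (message : String) (key_input : String) (out : String) : Decidable (Spec_row_transposition_encrypt message key_input out) := by unfold Spec_row_transposition_encrypt; infer_instance

-- ===== CLAIM (what is proved, stated in full; the proofs are below) =====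
def Claim_equal_row_transposition_encrypt : Prop := ∀ (message : String) (key_input : String), Dom_row_transposition_encrypt message key_input → Pre_row_transposition_encrypt message key_input → Spec_row_transposition_encrypt message key_input (row_transposition_encrypt message key_input)


-- ===== LEMMAS AND PROOFS =====

-- the character the grid holds at flat position j after the fill ('' for an unfilled cell)
def pvCell (msg : List Char) (j : Nat) : List Char := if h : j < msg.length then [msg[j]] else []

-- row r of the filled grid, starting at flat position s
def pvRowFill (msg : List Char) (cols s : Nat) : List (List Char) :=
  (List.range cols).map (fun c => pvCell msg (s + c))

theorem pvCell_nil (msg : List Char) (j : Nat) (h : msg.length <= j) : pvCell msg j = [] := by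
  rw [pvCell, dif_neg (by omega)]

theorem pvRowFill_min (msg : List Char) (cols s : Nat) :
    pvRowFill msg cols (min s msg.length) = pvRowFill msg cols s := by
  unfold pvRowFill
  refine List.map_congr_left (fun c _ => ?_)
  by_cases h : s <= msg.length
  · rw [min_eq_left h]
  · rw [min_eq_right (by omega), pvCell_nil _ _ (by omega), pvCell_nil _ _ (by omega)]

theorem pvFlatten_rowFill (msg : List Char) (m s : Nat) :
    (pvRowFill msg m s).flatten = (msg.drop s).take m := by
  induction m with
  | zero => simp [pvRowFill]
  | succ m ih =>
    rw [pvRowFill, List.range_succ, List.map_append, List.flatten_append,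
        List.take_add_one, ← pvRowFill, ih]
    congr 1
    rw [List.getElem?_drop]
    simp only [List.map_cons, List.map_nil, List.flatten_cons, List.flatten_nil, List.append_nil]
    by_cases h : s + m < msg.length
    · simp only [pvCell]; rw [dif_pos h, List.getElem?_eq_getElem h]; rfl
    · rw [pvCell_nil _ _ (by omega), List.getElem?_eq_none_iff.mpr (by omega)]; rfl

theorem pvInsertBy_map {a b k : Type} [LT k] [DecidableLT k] (g : a -> b) (key : b -> k)
    (x : a) (ys : List a) :
    PySem.List.insertBy (fun p q => decide (key p < key q)) (g x) (ys.map g)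
    = (PySem.List.insertBy (fun p q => decide (key (g p) < key (g q))) x ys).map g := by
  induction ys with
  | nil => simp [PySem.List.insertBy]
  | cons y t ih =>
    simp only [List.map_cons, PySem.List.insertBy]
    by_cases h : key (g x) < key (g y)
    · simp [h]
    · simp [h, ih]

theorem pvSorted_map {a b k : Type} [LT k] [DecidableLT k] (g : a -> b) (key : b -> k)
    (l : List a) :
    PySem.List.sorted (l.map g) key = (PySem.List.sorted l (fun x => key (g x))).map g := by
  rw [PySem.List.sorted_eq_foldl_insertBy, PySem.List.sorted_eq_foldl_insertBy]
  suffices h : forall acc : List a,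
      (l.map g).foldl (fun acc x => PySem.List.insertBy (fun p q => decide (key p < key q)) x acc) (acc.map g)
      = (l.foldl (fun acc x => PySem.List.insertBy (fun p q => decide (key (g p) < key (g q))) x acc) acc).map g by
    simpa using h []
  induction l with
  | nil => intro acc; simp
  | cons x t ih =>
    intro acc
    simp only [List.map_cons, List.foldl_cons]
    rw [pvInsertBy_map g key x acc, ih]

theorem pvRowfold (msg : List Char) (i0 : Nat) (m : Nat) :
    forall (row : List (List Char)), m <= row.length ->
    (forall (c : Nat) (h : c < row.length), row[c] = ([] : List Char)) ->
    (List.range m).foldl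
      (fun row c => if i0 + c < msg.length then row.set c (pvCell msg (i0 + c)) else row) row
    = (List.range m).map (fun c => pvCell msg (i0 + c)) ++ row.drop m := by
  induction m with
  | zero => intro row _ _; simp
  | succ m ih =>
    intro row hm hnil
    rw [List.range_succ, List.foldl_append, List.map_append, ih row (by omega) hnil]
    have hpl : ((List.range m).map (fun c => pvCell msg (i0 + c))).length = m := by simp
    have hdrop : row.drop m = row[m] :: row.drop (m + 1) :=
      List.drop_eq_getElem_cons (by omega)
    simp only [List.foldl_cons, List.foldl_nil]
    by_cases h : i0 + m < msg.length
    · rw [if_pos h, List.set_append_right _ _ (by omega), hpl, hdrop, Nat.sub_self,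
          List.set_cons_zero]
      simp
    · rw [if_neg h, hdrop]
      simp [hnil, pvCell_nil _ _ (show msg.length <= i0 + m by omega)]

theorem pvInnerFold (msg : List Char) (r : Nat) (m : Nat) :
    forall (g : List (List (List Char))) (hr : r < g.length) (i0 : Nat), i0 <= msg.length ->
    (List.range m).foldl
      (fun (st : List (List (List Char)) × Int) (c : Nat) =>
        if st.2 < (msg.length : Int) then
          (pvSet2 st.1 (r : Int) (c : Int) [PySem.List.pyGetD msg st.2 ' '], st.2 + 1)
        else st) (g, (i0 : Int))
    = (g.set r ((List.range m).foldl
        (fun row c => if i0 + c < msg.length then row.set c (pvCell msg (i0 + c)) else row) g[r]),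
       ((min (i0 + m) msg.length : Nat) : Int)) := by
  induction m with
  | zero =>
    intro g hr i0 hi
    simp [List.set_getElem_self, Nat.min_eq_left (by omega : i0 <= msg.length)]
  | succ m ih =>
    intro g hr i0 hi
    rw [List.range_succ, List.foldl_append, ih g hr i0 hi, List.foldl_append]
    simp only [List.foldl_cons, List.foldl_nil]
    by_cases h : i0 + m < msg.length
    · have hmin : min (i0 + m) msg.length = i0 + m := by omega
      rw [hmin, if_pos (by exact_mod_cast h), if_pos h]
      simp only [Prod.mk.injEq]
      refine ⟨?_, by push_cast; omega⟩
      simp only [pvSet2, Int.toNat_natCast, PySem.List.pyGetD_natCast]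
      rw [List.getD_eq_getElem _ _ (by simpa using hr), List.getElem_set_self, List.set_set]
      congr 2
      · simp only [pvCell]; rw [dif_pos h, List.getD_eq_getElem _ _ h]
    · have hmin : min (i0 + m) msg.length = msg.length := by omega
      rw [hmin, if_neg (by exact_mod_cast lt_irrefl (msg.length : Int)), if_neg h]
      simp only [Prod.mk.injEq]
      refine ⟨trivial, ?_⟩
      congr 1
      omega

theorem pvOuterFold (msg : List Char) (cols rows : Nat) (k : Nat) (hk : k <= rows) :
    (List.range k).foldl
      (fun (st : List (List (List Char)) × Int) (r : Nat) =>
        (List.range cols).foldl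
          (fun st (c : Nat) =>
            if st.2 < (msg.length : Int) then
              (pvSet2 st.1 (r : Int) (c : Int) [PySem.List.pyGetD msg st.2 ' '], st.2 + 1)
            else st) st)
      (List.replicate rows (List.replicate cols ([] : List Char)), (0 : Int))
    = ((List.range k).map (fun r => pvRowFill msg cols (r * cols))
         ++ List.replicate (rows - k) (List.replicate cols []),
       ((min (k * cols) msg.length : Nat) : Int)) := by
  induction k with
  | zero => simp
  | succ k ih =>
    rw [List.range_succ, List.foldl_append, ih (by omega)]
    simp only [List.foldl_cons, List.foldl_nil]
    have hlen : ((List.range k).map (fun r => pvRowFill msg cols (r * cols))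
        ++ List.replicate (rows - k) (List.replicate cols ([] : List Char))).length = rows := by
      simp; omega
    have hrk : k < ((List.range k).map (fun r => pvRowFill msg cols (r * cols))
        ++ List.replicate (rows - k) (List.replicate cols ([] : List Char))).length := by omega
    rw [pvInnerFold msg k cols _ hrk _ (by omega)]
    have hget : ((List.range k).map (fun r => pvRowFill msg cols (r * cols))
        ++ List.replicate (rows - k) (List.replicate cols ([] : List Char)))[k]
        = List.replicate cols ([] : List Char) := by
      rw [List.getElem_append_right (by simp)]
      simp
    rw [hget]
    rw [pvRowfold msg _ cols _ (by simp) (by intro c hc; simp)]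
    simp only [List.drop_replicate, Nat.sub_self, List.replicate_zero, List.append_nil]
    have hfill : (List.range cols).map (fun c => pvCell msg (min (k * cols) msg.length + c))
        = pvRowFill msg cols (k * cols) := by
      rw [← pvRowFill_min msg cols (k * cols)]; rfl
    rw [hfill]
    simp only [Prod.mk.injEq]
    constructor
    · rw [List.set_append_right _ _ (by simp)]
      have h2 : rows - k = (rows - (k + 1)) + 1 := by omega
      rw [h2, List.replicate_succ]
      simp [List.map_append]
    · congr 1
      have : (k + 1) * cols = k * cols + cols := by ring
      omega

theorem pvCharfold (row : List (List Char)) (acc : List Char) :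
    row.foldl (fun acc ch => if ch ≠ [] then acc ++ ch else acc) acc = acc ++ row.flatten := by
  rw [PySem.List.foldl_congr_mem row _ (fun acc ch => acc ++ ch) acc
        (by intro acc ch _; by_cases h : ch = [] <;> simp [h])]
  exact PySem.List.foldl_append_eq_flatten row acc

-- ===== VERDICT (by name: the statement is the Claim_ definition above) =====
theorem row_transposition_encrypt_spec : Claim_equal_row_transposition_encrypt := by
  intro message key_input _ hpre
  unfold Spec_row_transposition_encrypt
  simp only [row_transposition_encrypt, row_transposition_encrypt_alt]
  generalize (PySem.Str.replace message " " "").toList = msg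
  generalize hkeyeq : key_input.toList.map (fun k => (pvIntChar k).getD 0) = key
  have hk : key ≠ [] := by
    rw [← hkeyeq]; simpa using hpre.1
  have hR : 1 ≤ key.length := List.length_pos_of_ne_nil hk
  have hpos : (0 : Int) < (key.length : Int) := by exact_mod_cast hR
  have hed : PySem.Int.floordiv ((msg.length : Int) + (key.length : Int) - 1) (key.length : Int)
      = ((msg.length : Int) + (key.length : Int) - 1) / (key.length : Int) :=
    PySem.Int.floordiv_eq_ediv_of_pos hpos
  have hc0 : 0 ≤ PySem.Int.floordiv ((msg.length : Int) + (key.length : Int) - 1) (key.length : Int) := by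
    rw [hed]; exact Int.ediv_nonneg (by omega) (by omega)
  have hCdef : PySem.Int.floordiv ((msg.length : Int) + (key.length : Int) - 1) (key.length : Int)
      = ((PySem.Int.floordiv ((msg.length : Int) + (key.length : Int) - 1) (key.length : Int)).toNat : Int) :=
    Int.eq_natCast_toNat.mpr hc0
  generalize hCeq : (PySem.Int.floordiv ((msg.length : Int) + (key.length : Int) - 1) (key.length : Int)).toNat = C at hCdef
  rw [hCdef]
  -- msg.length ≤ key.length * C  (the grid holds the whole message)
  have hcount : msg.length ≤ key.length * C := by
    have h1 := Int.lt_ediv_add_one_mul_self ((msg.length : Int) + (key.length : Int) - 1) hpos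
    rw [← hed, hCdef] at h1
    have h2 : (msg.length : Int) ≤ (C : Int) * (key.length : Int) := by nlinarith
    have h3 : (msg.length : Int) ≤ ((key.length * C : Nat) : Int) := by push_cast; linarith
    exact_mod_cast h3
  -- ranges to List.range, the grid initialiser to replicate
  rw [PySem.List.pyRange_zero_nat key.length, PySem.List.pyRange_zero_nat C]
  simp only [List.map_const', List.length_map, List.length_range, List.foldl_map]
  -- the fill loops
  rw [pvOuterFold msg C key.length key.length (le_refl _)]
  simp only [Nat.sub_self, List.replicate_zero, List.append_nil]
  -- enumerate + stable sort on pairs = stable sort on row indices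
  rw [PySem.List.enumerate_eq_map_pyRange key 0, PySem.List.len_eq,
      PySem.List.pyRange_zero_nat key.length, List.map_map,
      pvSorted_map ((fun j => (j, PySem.List.pyGetD key j 0)) ∘ (Nat.cast : Nat → Int)) (fun x : Int × Int => x.2),
      pvSorted_map (Nat.cast : Nat → Int) (fun r => PySem.List.pyGetD key r 0)]
  simp only [Function.comp, List.foldl_map, List.map_map]
  -- the read-out loop: appending the nonempty cells of a row is appending its flatten
  simp only [pvCharfold]
  rw [PySem.List.foldl_append_eq_flatMap
        (fun y : Nat => (PySem.List.pyGetD (List.map (fun r => pvRowFill msg C (r * C)) (List.range key.length)) (y : Int) []).flatten)]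
  simp only [List.nil_append, List.flatMap_def]
  congr 1
  refine congrArg List.flatten (List.map_congr_left (fun j hj => ?_))
  have hjR : j < key.length := by
    rw [PySem.List.mem_sorted, List.mem_range] at hj; exact hj
  simp only [Function.comp]
  -- A's row read
  rw [PySem.List.pyGetD_natCast, PySem.List.getD_map_range _ _ _ _ hjR, pvFlatten_rowFill]
  -- B's row
  rw [PySem.List.pyGetD_natCast, PySem.List.getD_map_range _ _ _ _ hjR]
  simp only [Function.comp_apply]
  rw [PySem.List.slice_toNat msg (by positivity) (by positivity)]
  have e1 : ((j : Int) * (C : Int)).toNat = j * C := by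
    rw [← Nat.cast_mul, Int.toNat_natCast]
  have e2 : (((j : Int) + 1) * (C : Int)).toNat = (j + 1) * C := by
    rw [← Nat.cast_succ, ← Nat.cast_mul, Int.toNat_natCast]
  rw [e1, e2]
  congr 1
  simp [Nat.succ_mul]
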